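-- pv_equiv track=rewrite | github.com/KrozFu/project-algorithms | tests/p-testing/Final.py | CombinEstados
-- ===== SOURCE A (Python) =====
-- from itertools import product
-- from itertools import combinations
--
-- def CombinEstados(futuro,actual):
--         IndicesSelec=[]
--         segListaCombi = [list(comb) for longitud in range(1, len(actual) + 1) for comb in combinations(actual, longitud)]
--         priListaCombi = [list(comb) for longitud in range(1, len(futuro) + 1) for comb in combinations(futuro, longitud)]
--         segListaCombi.insert(0,[0])
--         priListaCombi.insert(0,[0])
--         permutaciones = list(product(priListaCombi, segListaCombi))
--         mid1 = permutaciones[:len(permutaciones)//2]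
--         mid2 = permutaciones[len(permutaciones)//2:]
--         matrix=[]
--         mid2.reverse()
--         for i in range(0, len(mid1)):
--             matrix.append([mid1[i], mid2[i]])
--         listA =[]
--         listB=[]
--         listC=[]
--         combMatrix = []
--         for fila in matrix:
--                 for lista in fila:
--                     for tupla in lista:
--                         for index in tupla:
--                                 listA.append(index)
--                         listC.append(listA)
--                         listA=[]
--                     listB.append(listC)
--                     listC=[]
--                 combMatrix.append(listB)
--                 listB=[]
--         IndicesSelec.append(futuro)
--         IndicesSelec.append(actual)
--         return combMatrix, IndicesSelec
-- ===== SOURCE B (Python) =====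
-- from itertools import combinations
--
-- def CombinEstados(futuro, actual):
--     # Same power-set lists as the spec, but the product/slice/reverse machinery
--     # is replaced by direct index arithmetic: entry i of the product is
--     # (pri[i//S], seg[i%S]), and its mirror partner is entry N-1-i.
--     seg = [[0]] + [list(c) for L in range(1, len(actual) + 1) for c in combinations(actual, L)]
--     pri = [[0]] + [list(c) for L in range(1, len(futuro) + 1) for c in combinations(futuro, L)]
--     S = len(seg)
--     N = len(pri) * S
--     combMatrix = []
--     for i in range(N // 2):
--         j = N - 1 - i
--         combMatrix.append([[pri[i // S], seg[i % S]],
--                            [pri[j // S], seg[j % S]]])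
--     return combMatrix, [futuro, actual]
-- ===== Notes on version B (the rewrite author's own statement) =====
-- stated objective: simpler
-- what changed: The materialised product list, the two half slices, the reverse and the four nested accumulator loops are replaced by a single loop that computes product entry i as (pri[i//S], seg[i%S]) and pairs it with its mirror entry N-1-i, building each output cell inline.
import Mathlib
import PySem

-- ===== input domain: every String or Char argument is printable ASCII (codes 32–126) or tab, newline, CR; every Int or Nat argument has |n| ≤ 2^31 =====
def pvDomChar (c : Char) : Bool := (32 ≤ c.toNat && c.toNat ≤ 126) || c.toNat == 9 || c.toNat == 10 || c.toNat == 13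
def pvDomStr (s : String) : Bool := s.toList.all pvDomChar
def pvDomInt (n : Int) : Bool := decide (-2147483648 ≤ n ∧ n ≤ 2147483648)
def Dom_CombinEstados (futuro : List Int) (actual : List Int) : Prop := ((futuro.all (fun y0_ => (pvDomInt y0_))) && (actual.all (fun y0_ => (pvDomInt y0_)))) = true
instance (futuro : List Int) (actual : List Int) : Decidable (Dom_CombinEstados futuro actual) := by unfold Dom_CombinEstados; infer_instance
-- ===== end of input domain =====

-- B replaces the materialised product + slicing + reverse + four nested accumulator
-- loops by direct index arithmetic (entry i of the product is (pri[i//S], seg[i%S]),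
-- its mirror is entry N-1-i), for a simpler decomposition of the same value.


-- ===== PORT A =====
-- Exact port of itertools.combinations(xs, k) (tuples in index-lexicographic
-- order, returned as lists): first all combinations containing the head, then
-- all combinations of the tail. Shared by both ports (B's comprehension builds
-- the identical power-set lists).
def pvCombosK : List Int → Nat → List (List Int)
  | _, 0 => [[]]
  | [], _ + 1 => []
  | x :: xs, k + 1 => (pvCombosK xs k).map (fun c => x :: c) ++ pvCombosK xs (k + 1)

def CombinEstados (futuro : List Int) (actual : List Int) : List (List (List (List Int))) × List (List Int) :=
  -- [list(comb) for longitud in range(1, len(actual)+1) for comb in combinations(actual, longitud)]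
  let segListaCombi := (List.range actual.length).flatMap (fun L => pvCombosK actual (L + 1))
  let priListaCombi := (List.range futuro.length).flatMap (fun L => pvCombosK futuro (L + 1))
  -- .insert(0, [0])
  let segListaCombi := [(0 : Int)] :: segListaCombi
  let priListaCombi := [(0 : Int)] :: priListaCombi
  -- list(product(priListaCombi, segListaCombi))
  let permutaciones := priListaCombi.flatMap (fun p => segListaCombi.map (fun s => (p, s)))
  let mid1 := permutaciones.take (permutaciones.length / 2)
  let mid2 := (permutaciones.drop (permutaciones.length / 2)).reverse
  -- for i in range(0, len(mid1)): matrix.append([mid1[i], mid2[i]])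
  let matrix := (List.range mid1.length).foldl
    (fun m i => m ++ [[mid1.getD i ([], []), mid2.getD i ([], [])]]) []
  -- the four nested accumulator loops (listA/listC/listB/combMatrix)
  let combMatrix := matrix.foldl (fun cM fila =>
    cM ++ [fila.foldl (fun lB lista =>
      lB ++ [[lista.1, lista.2].foldl (fun lC tupla =>
        lC ++ [tupla.foldl (fun lA idx => lA ++ [idx]) []]) []]) []]) []
  (combMatrix, [futuro, actual])

-- ===== PORT B =====
def CombinEstados_alt (futuro : List Int) (actual : List Int) : List (List (List (List Int))) × List (List Int) :=
  let seg := [(0 : Int)] :: (List.range actual.length).flatMap (fun L => pvCombosK actual (L + 1))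
  let pri := [(0 : Int)] :: (List.range futuro.length).flatMap (fun L => pvCombosK futuro (L + 1))
  let S := seg.length
  let N := pri.length * S
  -- all indices below are in range, so Python's pri[i//S] etc. never raises;
  -- getD is exact here (i, j, S, N are nonnegative, // and % are Nat div/mod)
  let combMatrix := (List.range (N / 2)).map (fun i =>
    let j := N - 1 - i
    [[pri.getD (i / S) [], seg.getD (i % S) []],
     [pri.getD (j / S) [], seg.getD (j % S) []]])
  (combMatrix, [futuro, actual])

-- ===== PRECONDITION & SPEC =====
def Spec_CombinEstados (futuro : List Int) (actual : List Int) (out : List (List (List (List Int))) × List (List Int)) : Prop := out = CombinEstados_alt futuro actual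
instance (futuro : List Int) (actual : List Int) (out : List (List (List (List Int))) × List (List Int)) : Decidable (Spec_CombinEstados futuro actual out) := by unfold Spec_CombinEstados; infer_instance

-- ===== CLAIM (what is proved, stated in full; the proofs are below) =====
def Claim_equal_CombinEstados : Prop := ∀ (futuro : List Int) (actual : List Int), Dom_CombinEstados futuro actual → Spec_CombinEstados futuro actual (CombinEstados futuro actual)

-- ===== LEMMAS AND PROOFS =====

-- append-accumulator fold = map
theorem foldl_append_map {α β : Type} (f : α → β) (l : List α) (init : List β) :
    l.foldl (fun acc a => acc ++ [f a]) init = init ++ l.map f := by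
  induction l generalizing init with
  | nil => simp
  | cons x xs ih => simp [List.foldl, ih, List.append_assoc]

-- the product list: length
theorem prod_length {α β : Type} (pri : List α) (seg : List β) :
    (pri.flatMap (fun p => seg.map (fun s => (p, s)))).length = pri.length * seg.length := by
  induction pri with
  | nil => simp
  | cons p ps ih => simp [ih, Nat.succ_mul, Nat.add_comm]

-- the product list: element i is (pri[i / S], seg[i % S])
theorem prod_getD {α β : Type} (pri : List α) (seg : List β) (i : Nat) (da : α) (db : β)
    (hi : i < pri.length * seg.length) :
    (pri.flatMap (fun p => seg.map (fun s => (p, s)))).getD i (da, db)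
      = (pri.getD (i / seg.length) da, seg.getD (i % seg.length) db) := by
  induction pri generalizing i with
  | nil => simp at hi
  | cons p ps ih =>
    have hS : 0 < seg.length := Nat.pos_of_ne_zero (by rintro h0; rw [h0] at hi; simp at hi)
    by_cases h : i < seg.length
    · rw [List.flatMap_cons, List.getD_append _ _ _ _ (by simpa using h),
          Nat.div_eq_of_lt h, Nat.mod_eq_of_lt h,
          List.getD_eq_getElem _ _ (by simpa using h), List.getElem_map,
          List.getD_eq_getElem _ _ h]
      rfl
    · push Not at h
      rw [List.flatMap_cons, List.getD_append_right _ _ _ _ (by simpa using h)]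
      simp only [List.length_map]
      have hi' : i - seg.length < ps.length * seg.length := by
        simp [List.length_cons, Nat.succ_mul] at hi; omega
      rw [ih _ hi']
      have hx : i / seg.length = (i - seg.length) / seg.length + 1 := by
        conv_lhs => rw [← Nat.sub_add_cancel h]
        rw [Nat.add_div_right _ hS]
      have hmod : (i - seg.length) % seg.length = i % seg.length := by
        conv_rhs => rw [← Nat.sub_add_cancel h]
        rw [Nat.add_mod_right]
      rw [hx, hmod]
      simp [List.getD]

-- getD of take / of reverse-of-drop, within bounds
theorem getD_take_eq {α : Type} (l : List α) (n i : Nat) (d : α) (h : i < n) (h2 : i < l.length) :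
    (l.take n).getD i d = l.getD i d := by
  rw [List.getD_eq_getElem _ _ (by simp; omega), List.getD_eq_getElem _ _ h2, List.getElem_take]

theorem getD_reverse_drop {α : Type} (l : List α) (n i : Nat) (d : α)
    (h : i < l.length - n) :
    ((l.drop n).reverse).getD i d = l.getD (l.length - 1 - i) d := by
  have hlen : (l.drop n).length = l.length - n := List.length_drop ..
  have hi' : i < (l.drop n).reverse.length := by simpa [hlen] using h
  rw [List.getD_eq_getElem _ _ hi', List.getD_eq_getElem _ _ (by omega),
      List.getElem_reverse, List.getElem_drop]
  congr 1
  omega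

theorem CombinEstados_eq_alt (futuro actual : List Int) :
    CombinEstados futuro actual = CombinEstados_alt futuro actual := by
  unfold CombinEstados CombinEstados_alt
  simp only []
  set seg := ([(0 : Int)] :: (List.range actual.length).flatMap (fun L => pvCombosK actual (L + 1))) with hseg
  set pri := ([(0 : Int)] :: (List.range futuro.length).flatMap (fun L => pvCombosK futuro (L + 1))) with hpri
  set perm := pri.flatMap (fun p => seg.map (fun s => (p, s))) with hperm
  have hS : 0 < seg.length := by rw [hseg]; simp
  have hN : perm.length = pri.length * seg.length := prod_length pri seg
  refine Prod.ext ?_ rfl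
  simp only [foldl_append_map, List.nil_append, List.map_map]
  rw [List.length_take, hN, min_eq_left (Nat.div_le_self _ _) ]
  apply List.map_congr_left
  intro i hi
  simp only [List.mem_range] at hi
  have hiN : i < pri.length * seg.length := lt_of_lt_of_le hi (by omega)
  have hjN : pri.length * seg.length - 1 - i < pri.length * seg.length := by omega
  have h1 : (perm.take (pri.length * seg.length / 2)).getD i (([] : List Int), ([] : List Int)) =
      (pri.getD (i / seg.length) [], seg.getD (i % seg.length) []) := by
    rw [getD_take_eq _ _ _ _ (by omega) (by omega), prod_getD _ _ _ _ _ (by omega)]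
  have h2 : ((perm.drop (pri.length * seg.length / 2)).reverse).getD i (([] : List Int), ([] : List Int)) =
      (pri.getD ((pri.length * seg.length - 1 - i) / seg.length) [],
       seg.getD ((pri.length * seg.length - 1 - i) % seg.length) []) := by
    rw [getD_reverse_drop _ _ _ _ (by omega)]
    rw [show perm.length - 1 - i = pri.length * seg.length - 1 - i by omega]
    rw [prod_getD _ _ _ _ _ (by omega)]
  simp only [List.getD_eq_getElem?_getD] at h1 h2
  simp [h1, h2]

-- ===== VERDICT (by name: the statement is the Claim_ definition above) =====
theorem CombinEstados_spec : Claim_equal_CombinEstados := by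
  intro futuro actual _
  exact CombinEstados_eq_alt futuro actual
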